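-- pv_equiv track=rewrite | github.com/SETI/rms-ephemeris-tools | src/ephemeris_tools/tracker.py | _ring_options_to_flags
-- ===== SOURCE A (Python) =====
-- def _ring_options_to_flags(planet_num: int, ring_options: list[int], nrings: int) -> list[bool]:
--     """Convert CGI ring option codes to ring visibility flags (tracker3_xxx.f).
--
--     Parameters:
--         planet_num: Planet number (5=Jupiter, 6=Saturn, etc.).
--         ring_options: List of option codes (e.g. 61=Saturn main, 62=G+E).
--         nrings: Number of ring entries in geometry.
--
--     Returns:
--         List of bool, one per ring; True = show.
--     """
--     required = 5 if planet_num == 6 else (3 if planet_num == 5 else 1)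
--     flags = [False] * max(nrings, required, 1)
--     for opt in ring_options:
--         if planet_num == 5:  # Jupiter: 51=Main, 52=Gossamer
--             if opt == 51:
--                 flags[0] = True
--             elif opt == 52:
--                 flags[1] = flags[2] = True
--         elif planet_num == 6:  # Saturn: 61=Main, 62=G+E, 63=outer
--             if opt == 61:
--                 flags[0] = True
--             elif opt == 62:
--                 flags[1] = flags[2] = True
--             elif opt == 63:
--                 flags[3] = flags[4] = True
--         elif (planet_num == 7 and opt == 71) or (planet_num == 8 and opt == 81):  # Uranus Epsilon
--             flags[0] = True
--     return flags
-- ===== SOURCE B (Python) =====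
-- def _enabler(planet_num, i):
--     """Option code that turns on ring slot i for this planet, or None."""
--     if planet_num == 5:
--         return 51 if i == 0 else (52 if i in (1, 2) else None)
--     if planet_num == 6:
--         return 61 if i == 0 else (62 if i in (1, 2) else (63 if i in (3, 4) else None))
--     if planet_num == 7:
--         return 71 if i == 0 else None
--     if planet_num == 8:
--         return 81 if i == 0 else None
--     return None
--
-- def _ring_options_to_flags(planet_num: int, ring_options: list[int], nrings: int) -> list[bool]:
--     required = 5 if planet_num == 6 else (3 if planet_num == 5 else 1)
--     opts = set(ring_options)
--     return [_enabler(planet_num, i) in opts for i in range(max(nrings, required, 1))]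
-- ===== Notes on version B (the rewrite author's own statement) =====
-- stated objective: alternative
-- what changed: Inverts the computation: instead of iterating over option codes and imperatively setting flag slots, B builds the flag list positionally, computing each slot i independently as 'the option code that enables slot i is present in the option set'; correct because each slot is enabled by at most one code and flag-setting is monotone.
import Mathlib
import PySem

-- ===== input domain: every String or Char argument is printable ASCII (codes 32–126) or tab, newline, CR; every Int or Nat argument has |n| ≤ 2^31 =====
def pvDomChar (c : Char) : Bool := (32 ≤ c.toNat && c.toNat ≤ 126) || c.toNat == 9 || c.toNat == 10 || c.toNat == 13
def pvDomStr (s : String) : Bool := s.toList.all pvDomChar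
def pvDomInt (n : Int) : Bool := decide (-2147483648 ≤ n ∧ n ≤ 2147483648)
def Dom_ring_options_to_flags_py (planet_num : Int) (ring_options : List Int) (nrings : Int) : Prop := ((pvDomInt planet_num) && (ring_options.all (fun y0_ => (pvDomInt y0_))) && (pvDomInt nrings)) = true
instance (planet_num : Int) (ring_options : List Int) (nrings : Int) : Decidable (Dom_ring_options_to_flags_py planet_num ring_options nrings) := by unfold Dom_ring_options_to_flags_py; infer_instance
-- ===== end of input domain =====

-- B inverts A's computation: instead of looping over option codes and imperatively
-- setting flag slots, it builds the flag list positionally, computing each slot i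
-- independently as "the (unique) option code enabling slot i is in the option set"
-- (objective: alternative — a different traversal of the same data, same cost).

-- ===== PORT A =====
def ring_options_to_flags_py (planet_num : Int) (ring_options : List Int) (nrings : Int) : List Bool :=
  let required : Int := if planet_num = 6 then 5 else if planet_num = 5 then 3 else 1
  let flags : List Bool := List.replicate (max (max nrings required) 1).toNat false
  ring_options.foldl (fun flags opt =>
    if planet_num = 5 then
      if opt = 51 then flags.set 0 true
      else if opt = 52 then (flags.set 2 true).set 1 true
      else flags
    else if planet_num = 6 then
      if opt = 61 then flags.set 0 true
      else if opt = 62 then (flags.set 2 true).set 1 true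
      else if opt = 63 then (flags.set 4 true).set 3 true
      else flags
    else if (planet_num = 7 ∧ opt = 71) ∨ (planet_num = 8 ∧ opt = 81) then flags.set 0 true
    else flags) flags

-- ===== PORT B =====
-- _enabler from Source B: the option code that turns on ring slot i for this planet, or None
def pvEnabler (planet_num : Int) (i : Nat) : Option Int :=
  if planet_num = 5 then (if i = 0 then some 51 else if i = 1 ∨ i = 2 then some 52 else none)
  else if planet_num = 6 then
    (if i = 0 then some 61 else if i = 1 ∨ i = 2 then some 62
     else if i = 3 ∨ i = 4 then some 63 else none)
  else if planet_num = 7 then (if i = 0 then some 71 else none)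
  else if planet_num = 8 then (if i = 0 then some 81 else none)
  else none

def ring_options_to_flags_py_alt (planet_num : Int) (ring_options : List Int) (nrings : Int) : List Bool :=
  let required : Int := if planet_num = 6 then 5 else if planet_num = 5 then 3 else 1
  let opts : PySem.Set Int := PySem.Set.ofList ring_options
  (List.range (max (max nrings required) 1).toNat).map (fun i =>
    match pvEnabler planet_num i with
    | some c => PySem.Set.contains opts c   -- `None in opts` in Source B is always False on a set of ints
    | none => false)

-- ===== PRECONDITION & SPEC =====
def Spec_ring_options_to_flags_py (planet_num : Int) (ring_options : List Int) (nrings : Int) (out : List Bool) : Prop := out = ring_options_to_flags_py_alt planet_num ring_options nrings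
instance (planet_num : Int) (ring_options : List Int) (nrings : Int) (out : List Bool) : Decidable (Spec_ring_options_to_flags_py planet_num ring_options nrings out) := by unfold Spec_ring_options_to_flags_py; infer_instance

-- ===== CLAIM (what is proved, stated in full; the proofs are below) =====
def Claim_equal_ring_options_to_flags_py : Prop := ∀ (planet_num : Int) (ring_options : List Int) (nrings : Int), Dom_ring_options_to_flags_py planet_num ring_options nrings → Spec_ring_options_to_flags_py planet_num ring_options nrings (ring_options_to_flags_py planet_num ring_options nrings)

-- ===== LEMMAS AND PROOFS =====

-- A's loop body, named for the proofs
def pvStep (planet_num : Int) (flags : List Bool) (opt : Int) : List Bool :=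
  if planet_num = 5 then
    if opt = 51 then flags.set 0 true
    else if opt = 52 then (flags.set 2 true).set 1 true
    else flags
  else if planet_num = 6 then
    if opt = 61 then flags.set 0 true
    else if opt = 62 then (flags.set 2 true).set 1 true
    else if opt = 63 then (flags.set 4 true).set 3 true
    else flags
  else if (planet_num = 7 ∧ opt = 71) ∨ (planet_num = 8 ∧ opt = 81) then flags.set 0 true
  else flags

-- the number of slots A's loop may write for this planet
def pvReq (planet_num : Int) : Nat := if planet_num = 6 then 5 else if planet_num = 5 then 3 else 1

theorem pvStep_length (p : Int) (fs : List Bool) (o : Int) :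
    (pvStep p fs o).length = fs.length := by
  unfold pvStep; split_ifs <;> simp

theorem pvFold_length (p : Int) (l : List Int) (fs : List Bool) :
    (l.foldl (pvStep p) fs).length = fs.length := by
  induction l generalizing fs with
  | nil => rfl
  | cons o t ih => simp [List.foldl, ih, pvStep_length]

-- one step, element-wise: slot i flips to true exactly when o is slot i's enabler
theorem pvStep_getD (p : Int) (fs : List Bool) (o : Int) (i : Nat)
    (hlen : pvReq p ≤ fs.length) :
    (pvStep p fs o).getD i false = (fs.getD i false || (pvEnabler p i == some o)) := by
  unfold pvStep pvEnabler pvReq at *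
  split_ifs at * <;>
    simp_all [List.getD_eq_getElem?_getD, List.getElem?_set] <;>
    rcases i with _ | _ | _ | _ | _ | i <;> simp_all <;>
      first
        | omega
        | (rw [if_pos (by omega)]; rfl)

theorem pvFold_getD (p : Int) (l : List Int) (fs : List Bool) (i : Nat)
    (hlen : pvReq p ≤ fs.length) :
    (l.foldl (pvStep p) fs).getD i false
      = (fs.getD i false || l.any (fun o => pvEnabler p i == some o)) := by
  induction l generalizing fs with
  | nil => simp
  | cons o t ih =>
      simp only [List.foldl, List.any_cons]
      rw [ih _ (by rw [pvStep_length]; exact hlen), pvStep_getD p fs o i hlen]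
      cases fs.getD i false <;> simp

theorem pvReq_le (p : Int) (n : Int) :
    pvReq p ≤ (max (max n (if p = 6 then (5:Int) else if p = 5 then 3 else 1)) 1).toNat := by
  unfold pvReq; split_ifs <;> omega

-- ===== VERDICT (by name: the statement is the Claim_ definition above) =====
theorem ring_options_to_flags_py_spec : Claim_equal_ring_options_to_flags_py := by
  intro p opts n _
  unfold Spec_ring_options_to_flags_py ring_options_to_flags_py ring_options_to_flags_py_alt
  show opts.foldl (pvStep p) _ = _
  apply List.ext_getElem
  · simp [pvFold_length]
  · intro i h1 h2
    have hlen := pvReq_le p n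
    have := pvFold_getD p opts (List.replicate (max (max n (if p = 6 then (5:Int) else if p = 5 then 3 else 1)) 1).toNat false) i (by simpa using hlen)
    simp only [List.getD_eq_getElem?_getD, List.getElem?_eq_getElem h1,
      Option.getD_some] at this ⊢
    rw [this]
    have hi : i < (max (max n (if p = 6 then (5:Int) else if p = 5 then 3 else 1)) 1).toNat := by
      simpa [pvFold_length] using h1
    simp only [List.getElem_map, List.getElem_range]
    rw [List.getElem?_eq_getElem (by simpa using hi)]
    simp only [List.getElem_replicate, Option.getD_some, Bool.false_or]
    cases he : pvEnabler p i with
    | none => simp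
    | some c =>
        simp [PySem.Set.contains, PySem.Set.mem_ofList, List.any_beq]
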